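-- pv_equiv track=rewrite | github.com/suggondeese9/wordsmapping | processwords.py | generate_bitmasks
-- ===== SOURCE A (Python) =====
-- from itertools import permutations, product, chain
--
-- def generate_bitmasks(dictionary):
--     # Create a list of lists where each sublist contains the bit positions for each key
--     bit_positions = []
--     current_bit = 0
--     for key in dictionary:
--         bit_positions.append([(current_bit + i, dictionary[key][i]) for i in range(len(dictionary[key]))])
--         current_bit += len(dictionary[key])
--
--     # Generate all combinations of bit positions
--     for combination in product(*bit_positions):
--         bitmask = [0] * current_bit
--         selected_keys = []
--         selected_values = []
--         for pos, value in combination: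
--             bitmask[pos] = 1
--             selected_keys.append(value[0])
--             selected_values.append(value[1])
--         yield ''.join(map(str, bitmask)), ''.join(selected_values), ''.join(selected_keys)
-- ===== SOURCE B (Python) =====
-- def _suffixes(sizes):
--     if not sizes:
--         return [1]
--     rest = _suffixes(sizes[1:])
--     return [sizes[0] * rest[0]] + rest
--
-- def _decode(t, suffix):
--     digits = []
--     for s in suffix[1:]:
--         i, t = divmod(t, s)
--         digits.append(i)
--     return digits
--
-- def generate_bitmasks(dictionary):
--     groups = list(dictionary.values())
--     options = [[('0' * i + '1' + '0' * (len(g) - i - 1), k, v)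
--                 for i, (k, v) in enumerate(g)] for g in groups]
--     suffix = _suffixes([len(g) for g in groups])
--     for t in range(suffix[0]):
--         mask, vals, keys = [], [], []
--         for opts, i in zip(options, _decode(t, suffix)):
--             block, k, v = opts[i]
--             mask.append(block)
--             vals.append(v)
--             keys.append(k)
--         yield ''.join(mask), ''.join(vals), ''.join(keys)
-- ===== Notes on version B (the rewrite author's own statement) =====
-- stated objective: alternative
-- what changed: B replaces A's itertools.product over per-key (absolute-bit-position, value) option lists and per-combination zero-array mutation by a counting scheme: a single counter t walks range(product of group sizes) and is decoded into per-key choices by mixed-radix divmod against a precomputed suffix-product list, indexing a precomputed per-key table of (one-hot segment, key char, value char) options.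
import Mathlib
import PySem

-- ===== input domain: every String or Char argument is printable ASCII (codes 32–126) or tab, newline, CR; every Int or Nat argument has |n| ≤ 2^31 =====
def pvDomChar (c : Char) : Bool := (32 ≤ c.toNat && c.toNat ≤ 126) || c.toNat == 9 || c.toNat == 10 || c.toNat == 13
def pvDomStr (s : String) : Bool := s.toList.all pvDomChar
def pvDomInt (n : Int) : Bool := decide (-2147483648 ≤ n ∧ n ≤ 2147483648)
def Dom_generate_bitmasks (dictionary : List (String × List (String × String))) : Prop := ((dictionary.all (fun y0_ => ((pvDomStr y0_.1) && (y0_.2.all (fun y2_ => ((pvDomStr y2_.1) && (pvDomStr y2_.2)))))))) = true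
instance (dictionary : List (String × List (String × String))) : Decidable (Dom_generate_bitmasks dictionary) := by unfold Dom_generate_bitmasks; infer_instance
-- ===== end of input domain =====

-- B replaces A's itertools.product-plus-global-bit-array enumeration by a counting scheme:
-- one counter t walks range(total) and is decoded into per-key choices by mixed-radix divmod
-- against a precomputed suffix-product list, indexing a precomputed per-key option table.
-- Both Pythons are generators; equivalence is about the yielded sequence (as a list).

-- itertools.product(*ls), used by A (tuples rendered as lists)
def pvProduct {α : Type} (ls : List (List α)) : List (List α) :=
  ls.foldr (fun l acc => l.flatMap (fun x => acc.map (x :: ·))) [[]]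

-- ===== PORT A =====
def generate_bitmasks (dictionary : List (String × List (String × String))) : List (String × String × String) :=
  let d : PySem.Dict String (List (String × String)) := PySem.Dict.ofList dictionary
  let st := d.items.foldl
    (fun (st : List (List (Int × String × String)) × Int) kv =>
      (st.1 ++ [(PySem.List.pyRange 0 (PySem.List.len (d.getD kv.1 []))).map
          (fun i => (st.2 + i, PySem.List.pyGetD (d.getD kv.1 []) i ("", "")))],
       st.2 + PySem.List.len (d.getD kv.1 [])))
    ([], 0)
  (pvProduct st.1).foldl
    (fun out combination =>
      let s := combination.foldl
        (fun (s : List Int × List String × List String) pv =>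
          (PySem.List.pySetD s.1 pv.1 1, s.2.1 ++ [pv.2.1], s.2.2 ++ [pv.2.2]))
        (PySem.List.pyRepeat [(0 : Int)] st.2, [], [])
      out ++ [(PySem.Str.join "" (s.1.map PySem.Int.toStr),
               PySem.Str.join "" s.2.2,
               PySem.Str.join "" s.2.1)]) []

-- ===== PORT B =====
-- _suffixes(sizes): [product of sizes[j:] for each j], ending in 1
def pvSuffixes : List Int → List Int
  | [] => [1]
  | n :: rest => (n * PySem.List.pyGetD (pvSuffixes rest) 0 0) :: pvSuffixes rest

-- _decode(t, suffix): most-significant-first mixed-radix digits of t;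
-- divmod(t, s) is ported as (floordiv t s, mod t s), exact wherever Python returns
def pvDecode (t : Int) (suffix : List Int) : List Int :=
  ((PySem.List.slice suffix (some 1) none).foldl
    (fun (st : List Int × Int) s =>
      (st.1 ++ [PySem.Int.floordiv st.2 s], PySem.Int.mod st.2 s))
    ([], t)).1

-- '0'*i + '1' + '0'*(len(g)-i-1) built as its character list (exact: pure ASCII concatenation)
def generate_bitmasks_alt (dictionary : List (String × List (String × String))) : List (String × String × String) :=
  let d : PySem.Dict String (List (String × String)) := PySem.Dict.ofList dictionary
  let groups := d.values
  let options := groups.map (fun g =>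
    (PySem.List.enumerate g).map (fun it =>
      (String.ofList (PySem.List.pyRepeat ['0'] it.1 ++
        '1' :: PySem.List.pyRepeat ['0'] (PySem.List.len g - it.1 - 1)),
       it.2.1, it.2.2)))
  let suffix := pvSuffixes (groups.map PySem.List.len)
  (PySem.List.pyRange 0 (PySem.List.pyGetD suffix 0 0)).map (fun t =>
    let s := (options.zip (pvDecode t suffix)).foldl
      (fun (s : List String × List String × List String) oi =>
        let bkv := PySem.List.pyGetD oi.1 oi.2 ("", "", "")
        (s.1 ++ [bkv.1], s.2.1 ++ [bkv.2.2], s.2.2 ++ [bkv.2.1]))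
      ([], [], [])
    (PySem.Str.join "" s.1, PySem.Str.join "" s.2.1, PySem.Str.join "" s.2.2))

-- ===== PRECONDITION & SPEC =====
def Spec_generate_bitmasks (dictionary : List (String × List (String × String))) (out : List (String × String × String)) : Prop := out = generate_bitmasks_alt dictionary
instance (dictionary : List (String × List (String × String))) (out : List (String × String × String)) : Decidable (Spec_generate_bitmasks dictionary out) := by unfold Spec_generate_bitmasks; infer_instance

-- ===== CLAIM (what is proved, stated in full; the proofs are below) =====
def Claim_equal_generate_bitmasks : Prop := ∀ (dictionary : List (String × List (String × String))), Dom_generate_bitmasks dictionary → Spec_generate_bitmasks dictionary (generate_bitmasks dictionary)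

-- ===== LEMMAS AND PROOFS =====

-- abstract per-choice record: (block length, chosen index, chosen pair)
def pvBlockC (vs : List (String × String)) : List (Nat × Nat × String × String) :=
  (List.range vs.length).map (fun i => (vs.length, i, vs.getD i ("", "")))

def pvOptsC : List (String × List (String × String)) → List (List (Nat × Nat × String × String))
  | [] => []
  | kv :: t => pvBlockC kv.2 :: pvOptsC t

def pvOptsA (cb : Int) : List (String × List (String × String)) → List (List (Int × String × String))
  | [] => []
  | kv :: t =>
      (PySem.List.pyRange 0 (PySem.List.len kv.2)).map
        (fun i => (cb + i, PySem.List.pyGetD kv.2 i ("", ""))) :: pvOptsA (cb + kv.2.length) t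

def pvTotal (L : List (String × List (String × String))) : Nat := (L.map (fun kv => kv.2.length)).sum

def pvOneHotInt (n i : Nat) : List Int := List.replicate i 0 ++ 1 :: List.replicate (n - i - 1) 0
def pvOneHotChars (n i : Nat) : List Char := List.replicate i '0' ++ '1' :: List.replicate (n - i - 1) '0'

-- Nat-level mixed-radix decode (B's _decode, abstracted over cast noise)
def pvNatDecode (t : Nat) : List Nat → List Nat
  | [] => []
  | _ :: rest => t / rest.prod :: pvNatDecode (t % rest.prod) rest

lemma pvJoin_nil (parts : List (List Char)) : PySem.Chars.join [] parts = parts.flatten := by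
  show List.intercalate [] parts = parts.flatten
  simp [List.intercalate]
  induction parts with
  | nil => rfl
  | cons a t ih => cases t <;> simp_all [List.intersperse]

-- A's first loop, over an arbitrary list, builds pvOptsA and the total length
lemma pvFoldA (L : List (String × List (String × String)))
    (acc : List (List (Int × String × String))) (cb : Int) :
    L.foldl
      (fun (st : List (List (Int × String × String)) × Int) kv =>
        (st.1 ++ [(PySem.List.pyRange 0 (PySem.List.len kv.2)).map
            (fun i => (st.2 + i, PySem.List.pyGetD kv.2 i ("", "")))],
         st.2 + PySem.List.len kv.2)) (acc, cb)
      = (acc ++ pvOptsA cb L, cb + pvTotal L) := by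
  induction L generalizing acc cb with
  | nil => simp [pvOptsA, pvTotal]
  | cons kv t ih =>
    rw [List.foldl_cons, ih]
    simp only [pvOptsA, pvTotal, List.map_cons, List.sum_cons, PySem.List.len_eq,
               List.append_assoc, List.singleton_append, Prod.mk.injEq]
    refine ⟨trivial, by push_cast; ring⟩

-- each A-block is the C-block with the offset added
lemma pvBlockA_eq (cb : Int) (vs : List (String × String)) :
    (PySem.List.pyRange 0 (PySem.List.len vs)).map
        (fun i => (cb + i, PySem.List.pyGetD vs i ("", "")))
      = (pvBlockC vs).map (fun t => (cb + (t.2.1 : Int), t.2.2)) := by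
  simp only [PySem.List.len_eq, PySem.List.pyRange_zero_nat, pvBlockC, List.map_map]
  refine List.map_congr_left (fun k hk => ?_)
  simp [PySem.List.pyGetD_natCast]

lemma pvProduct_cons {α : Type} (l : List α) (ls : List (List α)) :
    pvProduct (l :: ls) = l.flatMap (fun x => (pvProduct ls).map (x :: ·)) := rfl

lemma pvSet_replicate (n i : Nat) (h : i < n) :
    (List.replicate n (0 : Int)).set i 1 = pvOneHotInt n i := by
  have hn : n = i + (n - i - 1) + 1 := by omega
  rw [hn]
  rw [show i + (n - i - 1) + 1 = i + ((n - i - 1) + 1) by omega, List.replicate_add,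
      List.set_append]
  simp [pvOneHotInt, List.replicate_succ]

-- A's inner fold over a product combination, with the already-written prefix generalized
lemma pvMainA (L : List (String × List (String × String)))
    (prefix_ : List Int) (ks vs : List String) :
    (pvProduct (pvOptsA (prefix_.length : Int) L)).map
      (fun c => c.foldl
        (fun (s : List Int × List String × List String) pv =>
          (PySem.List.pySetD s.1 pv.1 1, s.2.1 ++ [pv.2.1], s.2.2 ++ [pv.2.2]))
        (prefix_ ++ List.replicate (pvTotal L) 0, ks, vs))
    = (pvProduct (pvOptsC L)).map
      (fun c =>
        (prefix_ ++ (c.map (fun t => pvOneHotInt t.1 t.2.1)).flatten,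
         ks ++ c.map (fun t => t.2.2.1),
         vs ++ c.map (fun t => t.2.2.2))) := by
  induction L generalizing prefix_ ks vs with
  | nil => simp [pvOptsA, pvOptsC, pvTotal, pvProduct]
  | cons kv t ih =>
    simp only [pvOptsA, pvOptsC, pvProduct_cons]
    rw [pvBlockA_eq]
    simp only [pvBlockC, List.map_flatMap, List.flatMap_map, List.map_map]
    refine List.flatMap_congr (fun k hk => ?_)
    simp only [List.mem_range] at hk
    have hone : (pvOneHotInt kv.2.length k).length = kv.2.length := by
      simp [pvOneHotInt]; omega
    have hset : PySem.List.pySetD (prefix_ ++ List.replicate (pvTotal (kv :: t)) 0)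
        ((prefix_.length : Int) + (k : Int)) 1
        = (prefix_ ++ pvOneHotInt kv.2.length k) ++ List.replicate (pvTotal t) 0 := by
      rw [show ((prefix_.length : Int) + (k : Int)) = ((prefix_.length + k : Nat) : Int) by push_cast; ring,
          PySem.List.pySetD_natCast]
      have htot : pvTotal (kv :: t) = kv.2.length + pvTotal t := by simp [pvTotal]
      rw [htot, List.replicate_add, ← List.append_assoc, List.set_append, List.set_append]
      simp [hk, pvSet_replicate _ _ hk, List.append_assoc]
    simp only [Function.comp_def, List.foldl_cons]
    rw [hset]
    have hcb : ((prefix_.length : Int) + ((kv.2.length : Nat) : Int))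
        = (((prefix_ ++ pvOneHotInt kv.2.length k).length : Nat) : Int) := by
      simp [hone]
    rw [hcb, ih]
    refine List.map_congr_left (fun c _ => ?_)
    simp [List.append_assoc]

-- pvOptsC is a map of pvBlockC over the value lists
lemma pvOptsC_eq_map (L : List (String × List (String × String))) :
    pvOptsC L = (L.map (fun kv => kv.2)).map pvBlockC := by
  induction L with
  | nil => rfl
  | cons kv t ih => simp [pvOptsC, ih]

-- Nat-level suffix products
def pvNatSuffixes : List Nat → List Nat
  | [] => [1]
  | n :: rest => n * (pvNatSuffixes rest).headD 1 :: pvNatSuffixes rest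

lemma pvNatSuffixes_ne_nil (ns : List Nat) : pvNatSuffixes ns ≠ [] := by
  cases ns <;> simp [pvNatSuffixes]

lemma pvNatSuffixes_headD (ns : List Nat) : (pvNatSuffixes ns).headD 1 = ns.prod := by
  induction ns with
  | nil => rfl
  | cons n rest ih => simp only [pvNatSuffixes, List.headD_cons, List.prod_cons, ih]

lemma pvGetD_zero_cast (l : List Nat) (hl : l ≠ []) :
    PySem.List.pyGetD (l.map (fun n : Nat => (n : Int))) 0 0 = ((l.headD 1 : Nat) : Int) := by
  rcases l with _ | ⟨x, xs⟩
  · exact absurd rfl hl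
  · simp

-- B's _suffixes, over casts, is pvNatSuffixes
lemma pvSuffixes_cast (ns : List Nat) :
    pvSuffixes (ns.map (fun n : Nat => (n : Int)))
      = (pvNatSuffixes ns).map (fun n : Nat => (n : Int)) := by
  induction ns with
  | nil => rfl
  | cons n rest ih =>
    simp only [List.map_cons, pvSuffixes, pvNatSuffixes, ih,
               pvGetD_zero_cast _ (pvNatSuffixes_ne_nil rest)]
    push_cast
    rfl

-- B's _decode loop, over the cast suffix list, produces the pvNatDecode digits
lemma pvDecode_fold (ns : List Nat) (t : Nat) (acc : List Int) :
    (((pvNatSuffixes ns).tail.map (fun n : Nat => (n : Int))).foldl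
      (fun (st : List Int × Int) s =>
        (st.1 ++ [PySem.Int.floordiv st.2 s], PySem.Int.mod st.2 s))
      (acc, (t : Int))).1
    = acc ++ (pvNatDecode t ns).map (fun n : Nat => (n : Int)) := by
  induction ns generalizing t acc with
  | nil => simp [pvNatSuffixes, pvNatDecode]
  | cons n rest ih =>
    rcases h : pvNatSuffixes rest with _ | ⟨s, ss⟩
    · exact absurd h (pvNatSuffixes_ne_nil rest)
    · have hs : s = rest.prod := by
        have h2 := pvNatSuffixes_headD rest
        rw [h] at h2; simpa using h2
      have ih2 := ih (t % rest.prod) (acc ++ [((t / rest.prod : Nat) : Int)])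
      rw [h] at ih2
      simp only [pvNatSuffixes, h, List.tail_cons, List.map_cons, List.foldl_cons,
                 pvNatDecode, hs, PySem.Int.floordiv_natCast, PySem.Int.mod_natCast] at ih2 ⊢
      rw [ih2]
      simp [List.append_assoc]

-- a triple-accumulator append loop is three maps
lemma pvFold3 {α : Type} (f g h : α → String) (l : List α) (a b c : List String) :
    l.foldl (fun (s : List String × List String × List String) x =>
        (s.1 ++ [f x], s.2.1 ++ [g x], s.2.2 ++ [h x])) (a, b, c)
      = (a ++ l.map f, b ++ l.map g, c ++ l.map h) := by
  induction l generalizing a b c with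
  | nil => simp
  | cons x t ih => simp [ih, List.append_assoc]

lemma pvRange_mul_flatMap (n P : Nat) :
    List.range (n * P) = (List.range n).flatMap (fun i => (List.range P).map (fun r => i * P + r)) := by
  induction n with
  | zero => simp
  | succ n ih =>
    rw [Nat.succ_mul, List.range_add, ih, List.range_succ, List.flatMap_append]
    simp

-- decode digits are in range
lemma pvDecode_lt (G : List (List (String × String))) (t : Nat)
    (ht : t < (G.map List.length).prod) :
    ∀ gi ∈ G.zip (pvNatDecode t (G.map List.length)), gi.2 < gi.1.length := by
  induction G generalizing t with
  | nil => simp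
  | cons g G' ih =>
    intro gi hgi
    simp only [List.map_cons, pvNatDecode, List.prod_cons, List.zip_cons_cons, List.mem_cons] at hgi ht
    have hP : 0 < (G'.map List.length).prod := by
      rcases Nat.eq_zero_or_pos (G'.map List.length).prod with h0 | h
      · rw [h0, Nat.mul_zero] at ht; omega
      · exact h
    rcases hgi with rfl | hgi
    · exact (Nat.div_lt_iff_lt_mul hP).mpr (by omega)
    · exact ih (t % (G'.map List.length).prod) (Nat.mod_lt _ hP) gi hgi

-- counting + decoding enumerates exactly itertools.product of the abstract blocks
lemma pvDecodeProd (G : List (List (String × String))) :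
    (List.range (G.map List.length).prod).map
      (fun t => (G.zip (pvNatDecode t (G.map List.length))).map
        (fun gi => (gi.1.length, gi.2, gi.1.getD gi.2 ("", ""))))
    = pvProduct (G.map pvBlockC) := by
  induction G with
  | nil => rfl
  | cons g G' ih =>
    simp only [List.map_cons, List.prod_cons, pvProduct_cons, pvBlockC]
    rw [pvRange_mul_flatMap, List.map_flatMap]
    simp only [List.flatMap_map, List.map_map]
    refine List.flatMap_congr (fun i hi => ?_)
    simp only [List.mem_range] at hi
    rw [← ih, List.map_map]
    refine List.map_congr_left (fun r hr => ?_)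
    simp only [List.mem_range] at hr
    have hP : 0 < (G'.map List.length).prod := by omega
    have hdiv : (i * (G'.map List.length).prod + r) / (G'.map List.length).prod = i := by
      rw [Nat.add_comm, Nat.add_mul_div_right _ _ hP, Nat.div_eq_of_lt hr]; omega
    have hmod : (i * (G'.map List.length).prod + r) % (G'.map List.length).prod = r := by
      rw [Nat.add_comm, Nat.add_mul_mod_self_right, Nat.mod_eq_of_lt hr]
    simp only [Function.comp_def, pvNatDecode, hdiv, hmod, List.zip_cons_cons, List.map_cons]

-- indexing the precomputed option table at a valid digit yields the abstract record
lemma pvOpt_elem (g : List (String × String)) (i : Nat) (hb : i < g.length) :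
    PySem.List.pyGetD ((PySem.List.enumerate g).map (fun it =>
        (String.ofList (PySem.List.pyRepeat ['0'] it.1 ++
          '1' :: PySem.List.pyRepeat ['0'] (PySem.List.len g - it.1 - 1)),
         it.2.1, it.2.2))) (i : Int) ("", "", "")
      = (String.ofList (pvOneHotChars g.length i),
         (g.getD i ("", "")).1, (g.getD i ("", "")).2) := by
  rw [PySem.List.enumerate_eq_map_pyRange g ("", ""), List.map_map]
  simp only [PySem.List.len_eq]
  rw [PySem.List.pyGetD_map_pyRange _ g.length i _ hb]
  simp only [Function.comp_def, PySem.List.pyGetD_natCast, PySem.List.pyRepeat_singleton,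
             Int.toNat_natCast, pvOneHotChars]
  have h1 : (((g.length : Int)) - ((i : Nat) : Int) - 1).toNat = g.length - i - 1 := by omega
  rw [h1]

-- B's enumeration over any list of groups equals the abstract enumeration
lemma pvMainB_gen (G : List (List (String × String))) :
    (PySem.List.pyRange 0 (PySem.List.pyGetD (pvSuffixes (G.map PySem.List.len)) 0 0)).map (fun t =>
      let s := ((G.map (fun g =>
          (PySem.List.enumerate g).map (fun it =>
            (String.ofList (PySem.List.pyRepeat ['0'] it.1 ++
              '1' :: PySem.List.pyRepeat ['0'] (PySem.List.len g - it.1 - 1)),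
             it.2.1, it.2.2)))).zip (pvDecode t (pvSuffixes (G.map PySem.List.len)))).foldl
        (fun (s : List String × List String × List String) oi =>
          let bkv := PySem.List.pyGetD oi.1 oi.2 ("", "", "")
          (s.1 ++ [bkv.1], s.2.1 ++ [bkv.2.2], s.2.2 ++ [bkv.2.1]))
        ([], [], [])
      (PySem.Str.join "" s.1, PySem.Str.join "" s.2.1, PySem.Str.join "" s.2.2))
    = (pvProduct (G.map pvBlockC)).map
        (fun c =>
          (PySem.Str.join "" (c.map (fun t => String.ofList (pvOneHotChars t.1 t.2.1))),
           PySem.Str.join "" (c.map (fun t => t.2.2.2)),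
           PySem.Str.join "" (c.map (fun t => t.2.2.1)))) := by
  have hsizes : G.map PySem.List.len = (G.map List.length).map (fun n : Nat => (n : Int)) := by
    simp [List.map_map, Function.comp_def]
  have hsuf : pvSuffixes (G.map PySem.List.len)
      = (pvNatSuffixes (G.map List.length)).map (fun n : Nat => (n : Int)) := by
    rw [hsizes]; exact pvSuffixes_cast _
  have hProd : PySem.List.pyGetD (pvSuffixes (G.map PySem.List.len)) 0 0
      = (((G.map List.length).prod : Nat) : Int) := by
    rw [hsuf, pvGetD_zero_cast _ (pvNatSuffixes_ne_nil _), pvNatSuffixes_headD]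
  have hd : ∀ t : Nat, pvDecode (t : Int) (pvSuffixes (G.map PySem.List.len))
      = (pvNatDecode t (G.map List.length)).map (fun n : Nat => (n : Int)) := by
    intro t
    unfold pvDecode
    rw [hsuf, PySem.List.slice_from_one, ← List.map_tail, pvDecode_fold]
    simp
  rw [hProd, PySem.List.pyRange_zero_nat, ← pvDecodeProd]
  simp only [List.map_map, Function.comp_def]
  refine List.map_congr_left (fun t ht => ?_)
  simp only [List.mem_range] at ht
  have hlt := pvDecode_lt G t ht
  rw [hd t, List.zip_map,
      pvFold3 (f := fun oi : List (String × String × String) × Int =>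
          (PySem.List.pyGetD oi.1 oi.2 ("", "", "")).1)
        (g := fun oi : List (String × String × String) × Int =>
          (PySem.List.pyGetD oi.1 oi.2 ("", "", "")).2.2)
        (h := fun oi : List (String × String × String) × Int =>
          (PySem.List.pyGetD oi.1 oi.2 ("", "", "")).2.1)]
  simp only [List.nil_append, List.map_map, Function.comp_def, Prod.map_fst, Prod.map_snd]
  refine Prod.ext ?_ (Prod.ext ?_ ?_) <;> simp only
  · congr 1
    refine List.map_congr_left (fun gi hgi => ?_)
    rw [pvOpt_elem gi.1 gi.2 (hlt gi hgi)]
  · congr 1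
    refine List.map_congr_left (fun gi hgi => ?_)
    rw [pvOpt_elem gi.1 gi.2 (hlt gi hgi)]
  · congr 1
    refine List.map_congr_left (fun gi hgi => ?_)
    rw [pvOpt_elem gi.1 gi.2 (hlt gi hgi)]

-- B equals the abstract enumeration
lemma pvMainB (dictionary : List (String × List (String × String))) :
    generate_bitmasks_alt dictionary
      = (pvProduct (pvOptsC (PySem.Dict.ofList dictionary).items)).map
          (fun c =>
            (PySem.Str.join "" (c.map (fun t => String.ofList (pvOneHotChars t.1 t.2.1))),
             PySem.Str.join "" (c.map (fun t => t.2.2.2)),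
             PySem.Str.join "" (c.map (fun t => t.2.2.1)))) := by
  rw [pvOptsC_eq_map]
  exact pvMainB_gen ((PySem.Dict.ofList dictionary).items.map (fun kv => kv.2))

-- joining str(bit) over concatenated one-hot int blocks is joining the one-hot strings
lemma pvJoinMask (c : List (Nat × Nat × String × String)) :
    PySem.Str.join "" (((c.map (fun t => pvOneHotInt t.1 t.2.1)).flatten).map PySem.Int.toStr)
      = PySem.Str.join "" (c.map (fun t => String.ofList (pvOneHotChars t.1 t.2.1))) := by
  have hblk : ∀ n i : Nat, ((pvOneHotInt n i).map PySem.Int.toChars).flatten = pvOneHotChars n i := by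
    intro n i
    have h0 : PySem.Int.toChars 0 = ['0'] := by decide
    have h1 : PySem.Int.toChars 1 = ['1'] := by decide
    simp [pvOneHotInt, pvOneHotChars, h0, h1]
  show String.ofList _ = String.ofList _
  congr 1
  have he : ("" : String).toList = [] := rfl
  rw [he, pvJoin_nil, pvJoin_nil]
  simp only [List.map_map, Function.comp_def, PySem.Int.toList_toStr, String.toList_ofList,
             List.map_flatten]
  rw [List.flatten_flatten]
  simp [List.map_map, Function.comp_def, hblk]

-- A equals the same abstract enumeration
lemma pvMainA' (dictionary : List (String × List (String × String))) :
    generate_bitmasks dictionary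
      = (pvProduct (pvOptsC (PySem.Dict.ofList dictionary).items)).map
          (fun c =>
            (PySem.Str.join "" (((c.map (fun t => pvOneHotInt t.1 t.2.1)).flatten).map PySem.Int.toStr),
             PySem.Str.join "" (c.map (fun t => t.2.2.2)),
             PySem.Str.join "" (c.map (fun t => t.2.2.1)))) := by
  simp only [generate_bitmasks]
  rw [PySem.List.foldl_congr_mem _ _
      (fun (st : List (List (Int × String × String)) × Int) kv =>
        (st.1 ++ [(PySem.List.pyRange 0 (PySem.List.len kv.2)).map
            (fun i => (st.2 + i, PySem.List.pyGetD kv.2 i ("", "")))],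
         st.2 + PySem.List.len kv.2)) _
      (fun acc kv hkv => by
        have hv := PySem.Dict.getD_of_mem_items (PySem.Dict.ofList dictionary)
          (k := kv.1) (v := kv.2) (by simpa using hkv)
          (PySem.Dict.nodup_keys_ofList dictionary) []
        rw [hv])]
  rw [pvFoldA]
  simp only [List.nil_append, Int.zero_add, PySem.List.pyRepeat_singleton, Int.toNat_natCast]
  rw [PySem.List.foldl_append_singleton_eq_map
      (fun combination => _) (pvProduct (pvOptsA 0 (PySem.Dict.ofList dictionary).items)) []]
  have hmain := pvMainA (PySem.Dict.ofList dictionary).items [] [] []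
  simp only [List.length_nil, Nat.cast_zero, List.nil_append] at hmain
  have h2 := congrArg (List.map (fun s : List Int × List String × List String =>
      (PySem.Str.join "" (s.1.map PySem.Int.toStr), PySem.Str.join "" s.2.2, PySem.Str.join "" s.2.1))) hmain
  simpa [List.map_map, Function.comp_def] using h2
-- ===== VERDICT (by name: the statement is the Claim_ definition above) =====
theorem generate_bitmasks_spec : Claim_equal_generate_bitmasks := by
  unfold Claim_equal_generate_bitmasks
  intro dictionary _
  unfold Spec_generate_bitmasks
  rw [pvMainA', pvMainB]
  refine List.map_congr_left (fun c _ => ?_)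
  rw [pvJoinMask]
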